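-- pv_equiv track=rewrite | github.com/mohsinmalik324/school-sbu | cse337/hw1/q5-p2.py | check_chars_not_cons
-- ===== SOURCE A (Python) =====
-- def check_chars_not_cons(password):
-- 	n = len(password)
-- 	for i in range(0, n - 1):
-- 		c1 = password[i]
-- 		c2 = password[i + 1]
-- 		if c1 == c2:
-- 			return False
-- 	return True
-- ===== SOURCE B (Python) =====
-- def check_chars_not_cons(password):
--     # Count maximal runs of identical characters in one fold; the string has no
--     # two equal consecutive characters iff every run has length 1, i.e. the
--     # number of runs equals the length of the string.
--     runs = 0
--     prev = None
--     for ch in password: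
--         if ch != prev:
--             runs += 1
--         prev = ch
--     return runs == len(password)
-- ===== Notes on version B (the rewrite author's own statement) =====
-- stated objective: alternative
-- what changed: B folds over the characters counting maximal runs of identical characters (state: run count + previous char, no indexing, no early return) and returns whether the run count equals the length, instead of A's index loop over adjacent pairs with an early return.
import Mathlib
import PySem

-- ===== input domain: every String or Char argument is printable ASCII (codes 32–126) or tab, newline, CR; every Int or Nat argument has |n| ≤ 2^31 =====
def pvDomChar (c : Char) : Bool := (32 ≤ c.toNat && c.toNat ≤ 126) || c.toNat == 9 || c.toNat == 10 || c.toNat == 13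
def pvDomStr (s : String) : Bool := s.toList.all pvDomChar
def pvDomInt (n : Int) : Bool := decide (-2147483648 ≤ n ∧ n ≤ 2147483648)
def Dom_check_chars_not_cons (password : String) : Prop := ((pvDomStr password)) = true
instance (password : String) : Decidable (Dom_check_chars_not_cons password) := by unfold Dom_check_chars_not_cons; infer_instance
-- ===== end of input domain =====

-- B counts maximal runs of equal characters in a single fold and compares the
-- run count to the length, instead of A's index loop over adjacent pairs with
-- an early return; same cost, different decomposition.

-- ===== PORT A =====
-- the 'for i in range(0, n - 1)' loop with its early 'return False'
def loopA_check (password : String) : List Int → Bool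
  | [] => true
  | i :: rest =>
    let c1 := PySem.Str.pyGet? password i
    let c2 := PySem.Str.pyGet? password (i + 1)
    if c1 == c2 then false else loopA_check password rest

def check_chars_not_cons (password : String) : Bool :=
  let n : Int := PySem.Str.len password
  loopA_check password (PySem.List.pyRange 0 (n - 1) 1)

-- ===== PORT B =====
def check_chars_not_cons_alt (password : String) : Bool :=
  let st := password.toList.foldl
    (fun (s : Int × Option Char) ch =>
      (if some ch ≠ s.2 then s.1 + 1 else s.1, some ch)) ((0 : Int), (none : Option Char))
  st.1 == PySem.Str.len password

-- ===== PRECONDITION & SPEC =====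
def Spec_check_chars_not_cons (password : String) (out : Bool) : Prop := out = check_chars_not_cons_alt password
instance (password : String) (out : Bool) : Decidable (Spec_check_chars_not_cons password out) := by unfold Spec_check_chars_not_cons; infer_instance

-- ===== CLAIM (what is proved, stated in full; the proofs are below) =====
def Claim_equal_check_chars_not_cons : Prop := ∀ (password : String), Dom_check_chars_not_cons password → Spec_check_chars_not_cons password (check_chars_not_cons password)

-- ===== LEMMAS AND PROOFS =====

theorem loopA_iff (p : String) (L : List Int) :
    loopA_check p L = true ↔
      ∀ i ∈ L, ¬ (PySem.Str.pyGet? p i = PySem.Str.pyGet? p (i + 1)) := by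
  induction L with
  | nil => simp [loopA_check]
  | cons i rest ih =>
    simp only [loopA_check]
    by_cases h : PySem.Str.pyGet? p i = PySem.Str.pyGet? p (i + 1)
    · rw [if_pos (beq_iff_eq.mpr h)]
      exact iff_of_false (by simp)
        (fun hall => absurd h (hall i (List.mem_cons_self ..)))
    · rw [if_neg (by simpa using h), ih]
      constructor
      · intro hr a ha
        rcases List.mem_cons.mp ha with rfl | ha'
        · exact h
        · exact hr a ha'
      · intro hall a ha
        exact hall a (List.mem_cons_of_mem _ ha)

-- A returns true iff no two consecutive characters are equal
theorem portA_iff_chain (p : String) :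
    check_chars_not_cons p = true ↔ List.IsChain (· ≠ ·) p.toList := by
  rw [check_chars_not_cons, loopA_iff, List.isChain_iff_getElem]
  constructor
  · intro h k hk
    have hmem : (k : Int) ∈ PySem.List.pyRange 0 (PySem.Str.len p - 1) 1 := by
      rw [PySem.List.mem_pyRange_one]
      have := PySem.Str.len_eq p
      omega
    have hne := h _ hmem
    intro hEq
    apply hne
    have h1 : ((k : Int) + 1) = ((k + 1 : Nat) : Int) := by push_cast; ring
    rw [h1, PySem.Str.pyGet?_natCast, PySem.Str.pyGet?_natCast]
    rw [List.getElem?_eq_getElem (by omega), List.getElem?_eq_getElem hk, hEq]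
  · intro h i hmem
    rw [PySem.List.mem_pyRange_one] at hmem
    have hlen := PySem.Str.len_eq p
    have hk : i.toNat + 1 < p.toList.length := by omega
    have hi : (i.toNat : Int) = i := by omega
    intro hEq
    apply h i.toNat hk
    rw [← hi] at hEq
    have h1 : ((i.toNat : Int) + 1) = ((i.toNat + 1 : Nat) : Int) := by push_cast; ring
    rw [h1] at hEq
    simp only [PySem.Str.pyGet?_natCast,
      List.getElem?_eq_getElem (show i.toNat < p.toList.length by omega),
      List.getElem?_eq_getElem hk, Option.some.injEq] at hEq
    exact hEq

-- what B's accumulated state means: run count of l continuing after 'prev'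
def pvPrepend (p : Option Char) (l : List Char) : List Char :=
  p.elim l (fun c => c :: l)

theorem foldB_spec (l : List Char) (r : Int) (p : Option Char) :
    ((l.foldl (fun (s : Int × Option Char) ch =>
        (if some ch ≠ s.2 then s.1 + 1 else s.1, some ch)) (r, p)).1 ≤ r + l.length)
    ∧ ((l.foldl (fun (s : Int × Option Char) ch =>
        (if some ch ≠ s.2 then s.1 + 1 else s.1, some ch)) (r, p)).1 = r + l.length
        ↔ List.IsChain (· ≠ ·) (pvPrepend p l)) := by
  induction l generalizing r p with
  | nil =>
    constructor
    · simp
    · simp only [List.foldl_nil, List.length_nil]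
      constructor
      · intro _
        cases p with
        | none => exact List.isChain_nil
        | some c => exact List.isChain_singleton c
      · intro _; simp
  | cons ch t ih =>
    simp only [List.foldl_cons]
    by_cases h : some ch ≠ p
    · simp only [if_pos h]
      obtain ⟨ihle, ihiff⟩ := ih (r + 1) (some ch)
      constructor
      · simp only [List.length_cons]; omega
      · rw [show r + ((ch :: t).length : Int) = (r + 1) + t.length by simp; ring, ihiff]
        cases p with
        | none => simp [pvPrepend]
        | some c =>
          have hne : c ≠ ch := fun hc => h (by rw [hc])
          simp [pvPrepend, List.isChain_cons_cons, hne]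
    · simp only [if_neg h]
      rw [not_not] at h
      obtain ⟨ihle, _⟩ := ih r (some ch)
      constructor
      · simp only [List.length_cons]; omega
      · constructor
        · intro hEq; exfalso; simp only [List.length_cons] at hEq; omega
        · intro hch
          exfalso
          rw [← h] at hch
          simp [pvPrepend, List.isChain_cons_cons] at hch

theorem portB_iff_chain (p : String) :
    check_chars_not_cons_alt p = true ↔ List.IsChain (· ≠ ·) p.toList := by
  obtain ⟨hle, hiff⟩ := foldB_spec p.toList 0 none
  simp only [check_chars_not_cons_alt, beq_iff_eq, PySem.Str.len_eq]
  rw [show (0 : Int) + (p.toList.length : Int) = (p.toList.length : Int) by ring] at hiff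
  rw [pvPrepend] at hiff
  simpa using hiff

-- ===== VERDICT (by name: the statement is the Claim_ definition above) =====
theorem check_chars_not_cons_spec : Claim_equal_check_chars_not_cons := by
  intro password _
  unfold Spec_check_chars_not_cons
  have hA := portA_iff_chain password
  have hB := portB_iff_chain password
  cases hA' : check_chars_not_cons password
  · cases hB' : check_chars_not_cons_alt password
    · rfl
    · rw [hA'] at hA
      rw [hB'] at hB
      exact absurd (hA.mpr (hB.mp rfl)) (by simp)
  · rw [hA'] at hA
    rw [(portB_iff_chain password).mpr (hA.mp rfl)]
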